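-- pv_equiv track=rewrite | github.com/HomuraT/LLM4VKG | src/utils/tools.py | are_sets_connected
-- ===== SOURCE A (Python) =====
-- def are_sets_connected(sets):
--     parent = {}
--
--     def find(x):
--         if parent[x] != x:
--             parent[x] = find(parent[x])
--         return parent[x]
--
--     def union(x, y):
--         rootX = find(x)
--         rootY = find(y)
--         if rootX != rootY:
--             parent[rootY] = rootX
--
--     # 初始化每个元素的父节点
--     for s in sets:
--         for item in s:
--             if item not in parent:
--                 parent[item] = item
--
--     # 合并集合中的元素
--     for s in sets:
--         first_item = s[0]
--         for item in s[1:]: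
--             union(first_item, item)
--
--     # 找到所有集合的根节点
--     roots = set(find(item) for item in parent)
--
--     # 如果根节点只有一个，说明所有集合是连通的
--     return len(roots) == 1
-- ===== SOURCE B (Python) =====
-- def are_sets_connected(sets):
--     # Flat representative map with eager relabelling instead of a disjoint-set
--     # forest: rep[x] is always the canonical representative of x's component.
--     rep = {}
--     for s in sets:
--         for item in s:
--             if item not in rep:
--                 rep[item] = item
--         target = rep[s[0]]
--         group = {rep[item] for item in s}
--         for k in rep:
--             if rep[k] in group:
--                 rep[k] = target
--     return len(set(rep.values())) == 1
-- ===== Notes on version B (the rewrite author's own statement) =====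
-- stated objective: simpler
-- what changed: Replaces A's disjoint-set forest (recursive find with path compression plus union) by a flat representative map kept fully canonical: each set's classes are merged by one eager relabelling sweep, so there is no recursion, no parent chains and no final find pass.
import Mathlib
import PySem

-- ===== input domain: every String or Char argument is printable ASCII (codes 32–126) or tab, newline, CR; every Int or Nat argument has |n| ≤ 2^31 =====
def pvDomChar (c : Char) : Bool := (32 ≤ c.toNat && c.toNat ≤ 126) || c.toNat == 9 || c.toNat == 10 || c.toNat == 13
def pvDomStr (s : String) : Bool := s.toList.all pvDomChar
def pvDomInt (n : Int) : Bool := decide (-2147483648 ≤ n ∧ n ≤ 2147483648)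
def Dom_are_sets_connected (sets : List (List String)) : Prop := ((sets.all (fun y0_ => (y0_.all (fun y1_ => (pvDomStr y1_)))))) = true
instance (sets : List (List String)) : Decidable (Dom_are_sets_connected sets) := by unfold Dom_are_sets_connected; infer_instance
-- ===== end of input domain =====

-- B replaces A's disjoint-set forest (recursive find with path compression) by a flat
-- representative map kept fully canonical through eager relabelling; objective: simpler, not faster.

-- ===== PORT A =====
-- Python's recursive `find` terminates because `parent` is a forest; the Nat fuel
-- (always called with size+1, an upper bound on the chain length) only makes that
-- termination structural — the 0 branch is never reached on admitted inputs.
def ufFind : Nat → PySem.Dict String String → String → PySem.Dict String String × String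
  | 0, p, x => (p, x)
  | fuel + 1, p, x =>
    let px := p.getD x x          -- parent[x] (key always present when Python reads it)
    if px = x then (p, x)
    else
      let r := ufFind fuel p px   -- parent[x] = find(parent[x]); return parent[x]
      (r.1.insert x r.2, r.2)

def ufUnion (fuel : Nat) (p : PySem.Dict String String) (x y : String) :
    PySem.Dict String String :=
  let fx := ufFind fuel p x
  let fy := ufFind fuel fx.1 y
  if fx.2 ≠ fy.2 then fy.1.insert fy.2 fx.2 else fy.1

def aInitItem (p : PySem.Dict String String) (item : String) : PySem.Dict String String :=
  if p.contains item then p else p.insert item item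

def aInitSet (p : PySem.Dict String String) (s : List String) : PySem.Dict String String :=
  s.foldl aInitItem p

def aUnionSet (p : PySem.Dict String String) (s : List String) : PySem.Dict String String :=
  match s with
  | [] => p                       -- unreachable: Python raises IndexError at s[0]; Pre_ excludes
  | first :: rest => rest.foldl (fun p item => ufUnion (p.size + 1) p first item) p

def aRootStep (acc : PySem.Dict String String × PySem.Set String) (item : String) :
    PySem.Dict String String × PySem.Set String :=
  let f := ufFind (acc.1.size + 1) acc.1 item
  (f.1, PySem.Set.add acc.2 f.2)

def are_sets_connected (sets : List (List String)) : Bool :=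
  let p0 := sets.foldl aInitSet PySem.Dict.empty
  let p1 := sets.foldl aUnionSet p0
  let rf := p1.keys.foldl aRootStep (p1, PySem.Set.empty)
  rf.2.length == 1

-- ===== PORT B =====
def bInsertNew (rep : PySem.Dict String String) (item : String) : PySem.Dict String String :=
  if rep.contains item then rep else rep.insert item item

def bMergeSet (rep : PySem.Dict String String) (s : List String) : PySem.Dict String String :=
  let rep1 := s.foldl bInsertNew rep
  match s with
  | [] => rep1                    -- unreachable: Python raises IndexError at s[0]; Pre_ excludes
  | first :: _ =>
    let target := rep1.getD first first
    let group : PySem.Set String := PySem.Set.ofList (s.map (fun item => rep1.getD item item))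
    rep1.keys.foldl (fun r k => if group.contains (r.getD k k) then r.insert k target else r) rep1

def are_sets_connected_alt (sets : List (List String)) : Bool :=
  let rep := sets.foldl bMergeSet PySem.Dict.empty
  (PySem.Set.ofList rep.values).length == 1

-- ===== PRECONDITION & SPEC =====
-- Pre_ excludes exactly the inputs containing an empty inner list, on which both
-- Pythons raise IndexError at s[0] (A) resp. rep[s[0]] (B).
def Pre_are_sets_connected (sets : List (List String)) : Prop := ∀ s ∈ sets, s ≠ []
instance (sets : List (List String)) : Decidable (Pre_are_sets_connected sets) := by
  unfold Pre_are_sets_connected; infer_instance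

def pvWitness_are_sets_connected : List (List String) := [["a", "b"], ["b"]]

def Spec_are_sets_connected (sets : List (List String)) (out : Bool) : Prop :=
  out = are_sets_connected_alt sets
instance (sets : List (List String)) (out : Bool) : Decidable (Spec_are_sets_connected sets out) := by
  unfold Spec_are_sets_connected; infer_instance

-- ===== CLAIM (what is proved, stated in full; the proofs are below) =====
def Claim_equal_are_sets_connected : Prop := ∀ (sets : List (List String)),
  Dom_are_sets_connected sets → Pre_are_sets_connected sets →
  Spec_are_sets_connected sets (are_sets_connected sets)

-- ===== LEMMAS AND PROOFS =====

-- The "current parent pointer" of x (itself when absent, as for an untouched node).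
def pst (p : PySem.Dict String String) (x : String) : String := p.getD x x

-- RR p x r: following parent pointers from x reaches the root r.
inductive RR (p : PySem.Dict String String) : String → String → Prop
  | root {x : String} : pst p x = x → RR p x x
  | step {x r : String} : pst p x ≠ x → RR p (pst p x) r → RR p x r

-- RRn adds the chain length.
inductive RRn (p : PySem.Dict String String) : String → String → Nat → Prop
  | root {x : String} : pst p x = x → RRn p x x 0
  | step {x r : String} {n : Nat} : pst p x ≠ x → RRn p (pst p x) r n → RRn p x r (n + 1)

-- Cl p: every stored parent pointer points at a key (so chains stay inside the dict).
def Cl (p : PySem.Dict String String) : Prop := ∀ k v, p.get? k = some v → v ∈ p.keys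

-- Good p: the forest invariant of A's parent dict (and of B's rep dict via Cl).
def Good (p : PySem.Dict String String) : Prop :=
  p.keys.Nodup ∧ Cl p ∧ ∀ x, ∃ r, RR p x r

-- REq p q: same keys, same root relation (path compression never changes roots).
def REq (p q : PySem.Dict String String) : Prop :=
  p.keys = q.keys ∧ ∀ x r, RR p x r ↔ RR q x r

-- relab G R r: the effect of merging all classes with root in G into the class rooted R.
def relab (G : List String) (R r : String) : String := if r ∈ G then R else r

theorem get?_none_of_not_mem (d : PySem.Dict String String) (k : String) (h : k ∉ d.keys) :
    d.get? k = none := by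
  rw [PySem.Dict.get?_eq_none_iff_contains]
  cases hc : d.contains k with
  | true => exact absurd ((PySem.Dict.contains_iff_mem_keys d k).mp hc) h
  | false => rfl

theorem mem_of_get?_some (d : PySem.Dict String String) (k v : String) (h : d.get? k = some v) :
    k ∈ d.keys := by
  by_contra hk
  rw [get?_none_of_not_mem d k hk] at h
  simp at h

theorem getD_eq_of_get? (d : PySem.Dict String String) (k v dflt : String)
    (h : d.get? k = some v) : d.getD k dflt = v := by
  simp [PySem.Dict.getD, h]

theorem getD_of_not_mem (d : PySem.Dict String String) (k dflt : String) (h : k ∉ d.keys) :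
    d.getD k dflt = dflt := by
  simp [PySem.Dict.getD, get?_none_of_not_mem d k h]

theorem pst_of_not_mem (p : PySem.Dict String String) (x : String) (h : x ∉ p.keys) :
    pst p x = x := getD_of_not_mem p x x h

theorem mem_of_pst_ne (p : PySem.Dict String String) (x : String) (h : pst p x ≠ x) :
    x ∈ p.keys := by
  by_contra hx; exact h (pst_of_not_mem p x hx)

theorem pst_insert (p : PySem.Dict String String) (k v x : String) :
    pst (p.insert k v) x = if x = k then v else pst p x := by
  simp [pst, PySem.Dict.getD_insert]

theorem pst_mem (p : PySem.Dict String String) (hcl : Cl p) (x : String) (hx : x ∈ p.keys) :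
    pst p x ∈ p.keys := by
  cases hg : p.get? x with
  | none =>
    have hc := (PySem.Dict.contains_iff_mem_keys p x).mpr hx
    rw [PySem.Dict.get?_eq_none_iff_contains, hc] at hg
    simp at hg
  | some v => rw [pst, getD_eq_of_get? p x v x hg]; exact hcl x v hg

theorem RRn_root_fix {p : PySem.Dict String String} {x r : String} {n : Nat}
    (h : RRn p x r n) : pst p r = r := by
  induction h with
  | root h => exact h
  | step _ _ ih => exact ih

theorem RR_of_RRn {p : PySem.Dict String String} {x r : String} {n : Nat}
    (h : RRn p x r n) : RR p x r := by
  induction h with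
  | root h => exact RR.root h
  | step hne _ ih => exact RR.step hne ih

theorem RRn_of_RR {p : PySem.Dict String String} {x r : String}
    (h : RR p x r) : ∃ n, RRn p x r n := by
  induction h with
  | root h => exact ⟨0, RRn.root h⟩
  | step hne _ ih => obtain ⟨n, hn⟩ := ih; exact ⟨n + 1, RRn.step hne hn⟩

theorem RRn_det {p : PySem.Dict String String} {x r r' : String} {n n' : Nat}
    (h : RRn p x r n) (h' : RRn p x r' n') : r = r' ∧ n = n' := by
  induction h generalizing r' n' with
  | root hfix =>
    cases h' with
    | root _ => exact ⟨rfl, rfl⟩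
    | step hne _ => exact absurd hfix hne
  | step hne hrec ih =>
    cases h' with
    | root hfix => exact absurd hfix hne
    | step _ hrec' =>
      obtain ⟨he, hn⟩ := ih hrec'
      exact ⟨he, by omega⟩

theorem RR_det {p : PySem.Dict String String} {x r r' : String}
    (h : RR p x r) (h' : RR p x r') : r = r' := by
  obtain ⟨n, hn⟩ := RRn_of_RR h
  obtain ⟨n', hn'⟩ := RRn_of_RR h'
  exact (RRn_det hn hn').1

theorem RR_fix_of_self {p : PySem.Dict String String} {x : String}
    (h : RR p x x) : pst p x = x := by
  obtain ⟨n, hn⟩ := RRn_of_RR h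
  exact RRn_root_fix hn

theorem RR_mem_keys {p : PySem.Dict String String} (hcl : Cl p) {x r : String}
    (h : RR p x r) (hx : x ∈ p.keys) : r ∈ p.keys := by
  induction h with
  | root _ => exact hx
  | @step y s hne _ ih => exact ih (pst_mem p hcl y (mem_of_pst_ne p y hne))

theorem RRn_chain {p : PySem.Dict String String} {x r : String} {n : Nat}
    (h : RRn p x r n) :
    ∃ L : List String, L.length = n ∧ L.Nodup ∧ (∀ y ∈ L, y ∈ p.keys) ∧
      (∀ y ∈ L, ∃ m, RRn p y r m ∧ m ≤ n ∧ 0 < m) := by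
  induction h with
  | root _ => exact ⟨[], rfl, List.nodup_nil, by simp, by simp⟩
  | @step x r n hne hrec ih =>
    obtain ⟨L, hlen, hnd, hkeys, hm⟩ := ih
    have hx : RRn p x r (n + 1) := RRn.step hne hrec
    refine ⟨x :: L, by simp [hlen], ?_, ?_, ?_⟩
    · refine List.nodup_cons.mpr ⟨?_, hnd⟩
      intro hxL
      obtain ⟨m, hmr, hmle, _⟩ := hm x hxL
      have := (RRn_det hx hmr).2
      omega
    · intro y hy
      rcases List.mem_cons.mp hy with hy | hy
      · subst hy; exact mem_of_pst_ne p y hne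
      · exact hkeys y hy
    · intro y hy
      rcases List.mem_cons.mp hy with hy | hy
      · subst hy; exact ⟨n + 1, hx, le_refl _, by omega⟩
      · obtain ⟨m, hmr, hmle, hmpos⟩ := hm y hy
        exact ⟨m, hmr, by omega, hmpos⟩

theorem RRn_le {p : PySem.Dict String String} {x r : String} {n : Nat}
    (_hnd : p.keys.Nodup) (h : RRn p x r n) : n ≤ p.keys.length := by
  obtain ⟨L, hlen, hLnd, hkeys, _⟩ := RRn_chain h
  calc n = L.length := hlen.symm
    _ ≤ p.keys.length := (hLnd.subperm hkeys).length_le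

theorem size_eq_keys_length (d : PySem.Dict String String) : d.size = d.keys.length := by
  simp [PySem.Dict.size, PySem.Dict.keys]

theorem REq_refl (p : PySem.Dict String String) : REq p p := ⟨rfl, fun _ _ => Iff.rfl⟩

theorem REq_trans {p q s : PySem.Dict String String} (h1 : REq p q) (h2 : REq q s) : REq p s :=
  ⟨h1.1.trans h2.1, fun x r => (h1.2 x r).trans (h2.2 x r)⟩

-- Path compression: re-pointing x straight at its root changes no root.
theorem RR_insert_root {q : PySem.Dict String String} (_hg : Good q) {x r : String}
    (hq : RR q x r) (hrx : r ≠ x) :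
    ∀ y s, RR q y s → RR (q.insert x r) y s := by
  have hpne : pst q x ≠ x := by
    cases hq with
    | root h => exact absurd rfl hrx
    | step hne _ => exact hne
  have hrfix : pst q r = r := by
    obtain ⟨n, hn⟩ := RRn_of_RR hq; exact RRn_root_fix hn
  intro y s hys
  induction hys with
  | @root y hy =>
    by_cases hyx : y = x
    · subst hyx; exact absurd hy hpne
    · exact RR.root (by rw [pst_insert, if_neg hyx]; exact hy)
  | @step y s hne hrec ih =>
    by_cases hyx : y = x
    · subst hyx
      have hsr : s = r := RR_det (RR.step hne hrec) hq
      subst hsr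
      refine RR.step (x := y) ?_ ?_
      · rw [pst_insert, if_pos rfl]; exact hrx
      · rw [pst_insert, if_pos rfl]
        exact RR.root (by rw [pst_insert, if_neg hrx]; exact hrfix)
    · exact RR.step (by rw [pst_insert, if_neg hyx]; exact hne)
        (by rw [pst_insert, if_neg hyx]; exact ih)

theorem REq_insert_root {q : PySem.Dict String String} (hg : Good q) {x r : String}
    (hq : RR q x r) (hrx : r ≠ x) :
    REq q (q.insert x r) ∧ Good (q.insert x r) := by
  obtain ⟨hnd, hcl, htot⟩ := hg
  have hpne : pst q x ≠ x := by
    cases hq with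
    | root _ => exact absurd rfl hrx
    | step hne _ => exact hne
  have hxk : x ∈ q.keys := mem_of_pst_ne q x hpne
  have hrk : r ∈ q.keys := RR_mem_keys hcl hq hxk
  have hkeys : (q.insert x r).keys = q.keys :=
    PySem.Dict.keys_insert_of_contains q r ((PySem.Dict.contains_iff_mem_keys q x).mpr hxk)
  have hfwd := RR_insert_root ⟨hnd, hcl, htot⟩ hq hrx
  have hiff : ∀ y s, RR q y s ↔ RR (q.insert x r) y s := by
    intro y s
    constructor
    · exact hfwd y s
    · intro h'
      obtain ⟨s0, hs0⟩ := htot y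
      rw [RR_det h' (hfwd y s0 hs0)]
      exact hs0
  refine ⟨⟨hkeys.symm, hiff⟩, ?_, ?_, ?_⟩
  · rw [hkeys]; exact hnd
  · intro k v hkv
    rw [PySem.Dict.get?_insert] at hkv
    rw [hkeys]
    by_cases hk : k = x
    · rw [if_pos hk] at hkv
      cases hkv; exact hrk
    · rw [if_neg hk] at hkv
      exact hcl k v hkv
  · intro y
    obtain ⟨s, hs⟩ := htot y
    exact ⟨s, (hiff y s).mp hs⟩

theorem ufFind_spec : ∀ (fuel : Nat) (p : PySem.Dict String String) (x r : String) (n : Nat),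
    Good p → RRn p x r n → n < fuel →
    (ufFind fuel p x).2 = r ∧ Good (ufFind fuel p x).1 ∧ REq p (ufFind fuel p x).1 := by
  intro fuel
  induction fuel with
  | zero => intro p x r n _ _ h; omega
  | succ fuel ih =>
    intro p x r n hg hr hlt
    by_cases hpx : p.getD x x = x
    · have : ufFind (fuel + 1) p x = (p, x) := by
        simp only [ufFind]; rw [if_pos hpx]
      rw [this]
      cases hr with
      | root _ => exact ⟨rfl, hg, REq_refl p⟩
      | step hne _ => exact absurd hpx hne
    · cases hr with
      | root h => exact absurd h hpx
      | @step x r m hne hrec =>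
        have hres : ufFind (fuel + 1) p x =
            ((ufFind fuel p (pst p x)).1.insert x (ufFind fuel p (pst p x)).2,
             (ufFind fuel p (pst p x)).2) := by
          show (if p.getD x x = x then (p, x) else
            ((ufFind fuel p (p.getD x x)).1.insert x (ufFind fuel p (p.getD x x)).2,
             (ufFind fuel p (p.getD x x)).2)) = _
          rw [if_neg hpx]
          rfl
        obtain ⟨h2, hgq, heq⟩ := ih p (pst p x) r m hg hrec (by omega)
        have hrq : RR (ufFind fuel p (pst p x)).1 x r :=
          (heq.2 x r).mp (RR_of_RRn (RRn.step hne hrec))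
        have hrx : r ≠ x := by
          intro h
          subst h
          exact hne (RR_fix_of_self (RR_of_RRn (RRn.step hne hrec)))
        obtain ⟨heq2, hg2⟩ := REq_insert_root hgq hrq hrx
        rw [hres]
        refine ⟨h2, ?_, ?_⟩
        · rw [h2]; exact hg2
        · rw [h2]; exact REq_trans heq heq2

-- Roots are below fuel size+1, so ufFind at fuel = size+1 is exact.
theorem ufFind_run (p : PySem.Dict String String) (x r : String)
    (hg : Good p) (hr : RR p x r) :
    (ufFind (p.size + 1) p x).2 = r ∧ Good (ufFind (p.size + 1) p x).1 ∧
      REq p (ufFind (p.size + 1) p x).1 := by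
  obtain ⟨n, hn⟩ := RRn_of_RR hr
  have hb : n ≤ p.keys.length := RRn_le hg.1 hn
  exact ufFind_spec (p.size + 1) p x r n hg hn (by rw [size_eq_keys_length]; omega)

-- Union of two root classes: the root relation is relabelled pointwise.
theorem RR_insert_union {q : PySem.Dict String String} (_hg : Good q) {ra rb : String}
    (hra : pst q ra = ra) (hrb : pst q rb = rb) (hne : ra ≠ rb) :
    ∀ y s, RR q y s → RR (q.insert rb ra) y (if s = rb then ra else s) := by
  intro y s hys
  induction hys with
  | @root y hy =>
    by_cases hyb : y = rb
    · subst hyb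
      rw [if_pos rfl]
      refine RR.step ?_ ?_
      · rw [pst_insert, if_pos rfl]; exact hne
      · rw [pst_insert, if_pos rfl]
        exact RR.root (by rw [pst_insert, if_neg hne]; exact hra)
    · rw [if_neg hyb]
      exact RR.root (by rw [pst_insert, if_neg hyb]; exact hy)
  | @step y s hyne hrec ih =>
    have hyb : y ≠ rb := by
      intro h; subst h; exact hyne hrb
    exact RR.step (by rw [pst_insert, if_neg hyb]; exact hyne)
      (by rw [pst_insert, if_neg hyb]; exact ih)

theorem union_insert_good {q : PySem.Dict String String} (hg : Good q) {ra rb : String}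
    (hra : pst q ra = ra) (hrb : pst q rb = rb) (hne : ra ≠ rb)
    (hak : ra ∈ q.keys) (hbk : rb ∈ q.keys) :
    Good (q.insert rb ra) ∧ (q.insert rb ra).keys = q.keys := by
  obtain ⟨hnd, hcl, htot⟩ := hg
  have hkeys : (q.insert rb ra).keys = q.keys :=
    PySem.Dict.keys_insert_of_contains q ra ((PySem.Dict.contains_iff_mem_keys q rb).mpr hbk)
  refine ⟨⟨?_, ?_, ?_⟩, hkeys⟩
  · rw [hkeys]; exact hnd
  · intro k v hkv
    rw [PySem.Dict.get?_insert] at hkv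
    rw [hkeys]
    by_cases hk : k = rb
    · rw [if_pos hk] at hkv; cases hkv; exact hak
    · rw [if_neg hk] at hkv; exact hcl k v hkv
  · intro y
    obtain ⟨s, hs⟩ := htot y
    exact ⟨_, RR_insert_union ⟨hnd, hcl, htot⟩ hra hrb hne y s hs⟩

theorem ufUnion_spec {q : PySem.Dict String String} {a b ra rb : String}
    (hg : Good q) (ha : RR q a ra) (hb : RR q b rb)
    (hak : a ∈ q.keys) (hbk : b ∈ q.keys) :
    Good (ufUnion (q.size + 1) q a b) ∧ (ufUnion (q.size + 1) q a b).keys = q.keys ∧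
      ∀ y s, RR q y s → RR (ufUnion (q.size + 1) q a b) y (if s = rb then ra else s) := by
  obtain ⟨hf2, hgx, heqx⟩ := ufFind_run q a ra hg ha
  set fx := ufFind (q.size + 1) q a with hfx
  have hbx : RR fx.1 b rb := (heqx.2 b rb).mp hb
  obtain ⟨n, hn⟩ := RRn_of_RR hbx
  have hfuel : n < q.size + 1 := by
    have := RRn_le hgx.1 hn
    rw [size_eq_keys_length]
    rw [← heqx.1] at this
    omega
  obtain ⟨hf2', hgy, heqy⟩ := ufFind_spec (q.size + 1) fx.1 b rb n hgx hn hfuel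
  set fy := ufFind (q.size + 1) fx.1 b with hfy
  have heq : REq q fy.1 := REq_trans heqx heqy
  have hu : ufUnion (q.size + 1) q a b =
      (if fx.2 ≠ fy.2 then fy.1.insert fy.2 fx.2 else fy.1) := rfl
  by_cases hrr : ra = rb
  · have hcond : ¬ fx.2 ≠ fy.2 := by rw [hf2, hf2']; simp [hrr]
    rw [hu, if_neg hcond]
    refine ⟨hgy, heq.1.symm, ?_⟩
    intro y s hys
    have : RR fy.1 y s := (heq.2 y s).mp hys
    by_cases hsb : s = rb
    · rw [if_pos hsb, hrr, ← hsb]; exact this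
    · rw [if_neg hsb]; exact this
  · have hcond : fx.2 ≠ fy.2 := by rw [hf2, hf2']; exact hrr
    rw [hu, if_pos hcond, hf2, hf2']
    have hraf : pst fy.1 ra = ra := by
      have : RR q ra ra := RR.root (by
        obtain ⟨m, hm⟩ := RRn_of_RR ha; exact RRn_root_fix hm)
      exact RR_fix_of_self ((heq.2 ra ra).mp this)
    have hrbf : pst fy.1 rb = rb := by
      have : RR q rb rb := RR.root (by
        obtain ⟨m, hm⟩ := RRn_of_RR hb; exact RRn_root_fix hm)
      exact RR_fix_of_self ((heq.2 rb rb).mp this)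
    have hrak : ra ∈ fy.1.keys := by
      rw [← heq.1]; exact RR_mem_keys hg.2.1 ha hak
    have hrbk : rb ∈ fy.1.keys := by
      rw [← heq.1]; exact RR_mem_keys hg.2.1 hb hbk
    obtain ⟨hg', hk'⟩ := union_insert_good hgy hraf hrbf hrr hrak hrbk
    refine ⟨hg', by rw [hk', ← heq.1], ?_⟩
    intro y s hys
    exact RR_insert_union hgy hraf hrbf hrr y s ((heq.2 y s).mp hys)

theorem relab_singleton (R r : String) : relab [R] R r = r := by
  by_cases h : r = R <;> simp [relab, h]

theorem relab_step (G : List String) (R r rj : String) (hR : R ∈ G) :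
    (if relab G R r = relab G R rj then R else relab G R r) = relab (G ++ [rj]) R r := by
  by_cases hr : r ∈ G
  · have h1 : relab G R r = R := by simp [relab, hr]
    have h2 : relab (G ++ [rj]) R r = R := by simp [relab, hr]
    rw [h1, h2]
    by_cases hj : rj ∈ G
    · simp [relab, hj]
    · have : relab G R rj = rj := by simp [relab, hj]
      rw [this]
      by_cases hRj : R = rj
      · rw [if_pos hRj]
      · rw [if_neg hRj]
  · have h1 : relab G R r = r := by simp [relab, hr]
    rw [h1]
    by_cases hrj : r = rj
    · subst hrj
      simp [relab, hr]
    · have h2 : relab (G ++ [rj]) R r = r := by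
        simp [relab, hr, hrj]
      rw [h2]
      by_cases hj : rj ∈ G
      · have : relab G R rj = R := by simp [relab, hj]
        rw [this, if_neg (by intro h; exact hr (h ▸ hR))]
      · have : relab G R rj = rj := by simp [relab, hj]
        rw [this, if_neg hrj]

theorem unionFold_spec (ρ : String → String) (first R : String) :
    ∀ (J : List String) (q : PySem.Dict String String) (G : List String),
    Good q → R ∈ G → ρ first ∈ G → first ∈ q.keys → (∀ j ∈ J, j ∈ q.keys) →
    (∀ x, RR q x (relab G R (ρ x))) →
    Good (J.foldl (fun p item => ufUnion (p.size + 1) p first item) q) ∧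
    (J.foldl (fun p item => ufUnion (p.size + 1) p first item) q).keys = q.keys ∧
    (∀ x, RR (J.foldl (fun p item => ufUnion (p.size + 1) p first item) q) x
      (relab (G ++ J.map ρ) R (ρ x))) := by
  intro J
  induction J with
  | nil => intro q G hg hR hρf hfk _ hρ; exact ⟨hg, rfl, by simpa using hρ⟩
  | cons j J ih =>
    intro q G hg hR hρf hfk hjk hρ
    have ha : RR q first R := by
      have := hρ first
      rwa [show relab G R (ρ first) = R by simp [relab, hρf]] at this
    have hb : RR q j (relab G R (ρ j)) := hρ j
    obtain ⟨hg1, hk1, hrel⟩ := ufUnion_spec hg ha hb hfk (hjk j (List.mem_cons_self))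
    set q1 := ufUnion (q.size + 1) q first j with hq1
    have hρ1 : ∀ x, RR q1 x (relab (G ++ [ρ j]) R (ρ x)) := by
      intro x
      have := hrel x (relab G R (ρ x)) (hρ x)
      rwa [relab_step G R (ρ x) (ρ j) hR] at this
    have := ih q1 (G ++ [ρ j]) hg1 (List.mem_append_left _ hR)
      (List.mem_append_left _ hρf) (by rw [hk1]; exact hfk)
      (fun j' hj' => by rw [hk1]; exact hjk j' (List.mem_cons_of_mem _ hj'))
      hρ1
    refine ⟨this.1, this.2.1.trans hk1, ?_⟩
    intro x
    have h := this.2.2 x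
    rwa [List.append_assoc, List.singleton_append, ← List.map_cons] at h
    
-- ===== B-side characterization =====

theorem bInsertNew_pst (rep : PySem.Dict String String) (i x : String) :
    pst (bInsertNew rep i) x = pst rep x := by
  unfold bInsertNew
  by_cases hc : rep.contains i
  · rw [if_pos hc]
  · rw [if_neg hc, pst_insert]
    by_cases hx : x = i
    · subst hx
      rw [if_pos rfl, pst_of_not_mem]
      intro hm
      exact hc ((PySem.Dict.contains_iff_mem_keys rep x).mpr hm)
    · rw [if_neg hx]

theorem bInsertNew_keys (rep : PySem.Dict String String) (i : String) :
    (bInsertNew rep i).keys = PySem.Set.add rep.keys i := by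
  unfold bInsertNew
  by_cases hc : rep.contains i
  · rw [if_pos hc, PySem.Set.add_of_mem ((PySem.Dict.contains_iff_mem_keys rep i).mp hc)]
  · rw [if_neg hc, PySem.Dict.keys_insert_of_not_contains _ _ (by simpa using hc),
      PySem.Set.add_of_not_mem]
    intro hm
    exact hc ((PySem.Dict.contains_iff_mem_keys rep i).mpr hm)

theorem bInsertNew_good (rep : PySem.Dict String String) (i : String)
    (hnd : rep.keys.Nodup) (hcl : Cl rep) :
    (bInsertNew rep i).keys.Nodup ∧ Cl (bInsertNew rep i) := by
  unfold bInsertNew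
  by_cases hc : rep.contains i
  · rw [if_pos hc]; exact ⟨hnd, hcl⟩
  · rw [if_neg hc]
    refine ⟨PySem.Dict.nodup_keys_insert rep i i hnd, ?_⟩
    intro k v hkv
    rw [PySem.Dict.get?_insert] at hkv
    by_cases hk : k = i
    · rw [if_pos hk] at hkv
      cases hkv
      exact (PySem.Dict.mem_keys_insert rep i i i).mpr (Or.inl rfl)
    · rw [if_neg hk] at hkv
      exact (PySem.Dict.mem_keys_insert rep i v i).mpr (Or.inr (hcl k v hkv))

theorem bInit_fold (s : List String) :
    ∀ (rep : PySem.Dict String String), rep.keys.Nodup → Cl rep →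
    (∀ x, pst (s.foldl bInsertNew rep) x = pst rep x) ∧
    (s.foldl bInsertNew rep).keys = PySem.Set.update rep.keys s ∧
    (s.foldl bInsertNew rep).keys.Nodup ∧ Cl (s.foldl bInsertNew rep) := by
  induction s with
  | nil => intro rep hnd hcl; exact ⟨fun _ => rfl, rfl, hnd, hcl⟩
  | cons i s ih =>
    intro rep hnd hcl
    simp only [List.foldl_cons]
    obtain ⟨hnd1, hcl1⟩ := bInsertNew_good rep i hnd hcl
    obtain ⟨hp, hk, hnd2, hcl2⟩ := ih (bInsertNew rep i) hnd1 hcl1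
    refine ⟨fun x => (hp x).trans (bInsertNew_pst rep i x), ?_, hnd2, hcl2⟩
    rw [hk, bInsertNew_keys, PySem.Set.update_cons]

theorem relabelFold_get? (group : PySem.Set String) (t : String) :
    ∀ (ks : List String) (r rep : PySem.Dict String String),
    ks.Nodup → r.keys = rep.keys → (∀ k ∈ ks, r.get? k = rep.get? k) → (∀ k ∈ ks, k ∈ rep.keys) →
    (∀ x, (ks.foldl (fun r k => if group.contains (r.getD k k) then r.insert k t else r) r).get? x =
      if x ∈ ks ∧ group.contains (rep.getD x x) then some t else r.get? x) ∧
    (ks.foldl (fun r k => if group.contains (r.getD k k) then r.insert k t else r) r).keys = r.keys := by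
  intro ks
  induction ks with
  | nil => intro r rep _ _ _ _; exact ⟨fun x => by simp, rfl⟩
  | cons k ks ih =>
    intro r rep hnd hkeq hagree hmem
    have hkrep : k ∈ rep.keys := hmem k List.mem_cons_self
    have hgd : r.getD k k = rep.getD k k := by
      simp [PySem.Dict.getD, hagree k List.mem_cons_self]
    set r' := if group.contains (r.getD k k) then r.insert k t else r with hr'
    have hk'eq : r'.keys = rep.keys := by
      rw [hr']
      by_cases hc : group.contains (r.getD k k)
      · rw [if_pos hc, PySem.Dict.keys_insert_of_contains r t
          ((PySem.Dict.contains_iff_mem_keys r k).mpr (hkeq ▸ hkrep))]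
        exact hkeq
      · rw [if_neg hc]; exact hkeq
    have hagree' : ∀ k' ∈ ks, r'.get? k' = rep.get? k' := by
      intro k' hk'
      have hne : k' ≠ k := by
        intro h; subst h; exact (List.nodup_cons.mp hnd).1 hk'
      rw [hr']
      by_cases hc : group.contains (r.getD k k)
      · rw [if_pos hc, PySem.Dict.get?_insert, if_neg hne]
        exact hagree k' (List.mem_cons_of_mem _ hk')
      · rw [if_neg hc]; exact hagree k' (List.mem_cons_of_mem _ hk')
    obtain ⟨hget, hkeys⟩ := ih r' rep (List.nodup_cons.mp hnd).2 hk'eq hagree'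
      (fun k' hk' => hmem k' (List.mem_cons_of_mem _ hk'))
    refine ⟨?_, hkeys.trans (hk'eq.trans hkeq.symm)⟩
    intro x
    rw [List.foldl_cons, ← hr', hget x]
    by_cases hxk : x = k
    · subst hxk
      have hxks : x ∉ ks := (List.nodup_cons.mp hnd).1
      rw [if_neg (by intro h; exact hxks h.1)]
      rw [hr', hgd]
      by_cases hc : group.contains (rep.getD x x)
      · rw [if_pos hc, if_pos ⟨List.mem_cons_self, hc⟩, PySem.Dict.get?_insert, if_pos rfl]
      · rw [if_neg hc, if_neg (by intro h; exact hc h.2)]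
    · have hr'x : r'.get? x = r.get? x := by
        rw [hr']
        by_cases hc : group.contains (r.getD k k)
        · rw [if_pos hc, PySem.Dict.get?_insert, if_neg hxk]
        · rw [if_neg hc]
      rw [hr'x]
      simp [List.mem_cons, hxk]

theorem bMergeSet_spec (rep : PySem.Dict String String) (first : String) (rest : List String)
    (hnd : rep.keys.Nodup) (hcl : Cl rep) :
    (∀ x, pst (bMergeSet rep (first :: rest)) x =
        relab ((first :: rest).map (pst rep)) (pst rep first) (pst rep x)) ∧
    (bMergeSet rep (first :: rest)).keys = PySem.Set.update rep.keys (first :: rest) ∧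
    (bMergeSet rep (first :: rest)).keys.Nodup ∧ Cl (bMergeSet rep (first :: rest)) := by
  obtain ⟨hp, hk1, hnd1, hcl1⟩ := bInit_fold (first :: rest) rep hnd hcl
  set s := first :: rest with hs
  set rep1 := s.foldl bInsertNew rep with hrep1
  have hmem_s : ∀ i ∈ s, i ∈ rep1.keys := by
    intro i hi
    rw [hk1]
    exact (PySem.Set.mem_update _ _ _).mpr (Or.inr hi)
  set target := rep1.getD first first with htgt
  set group : PySem.Set String := PySem.Set.ofList (s.map (fun item => rep1.getD item item))
    with hgrp
  have hres : bMergeSet rep s =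
      rep1.keys.foldl (fun r k => if group.contains (r.getD k k) then r.insert k target else r)
        rep1 := rfl
  obtain ⟨hget, hkeys⟩ := relabelFold_get? group target rep1.keys rep1 rep1 hnd1 rfl
    (fun _ _ => rfl) (fun _ hk => hk)
  have htgt' : target = pst rep first := hp first
  have hGmem : ∀ v, group.contains v = true ↔ v ∈ s.map (pst rep) := by
    intro v
    rw [hgrp, PySem.Set.contains_iff, PySem.Set.mem_ofList]
    constructor
    · rintro hm
      obtain ⟨i, hi, hv⟩ := List.mem_map.mp hm
      exact List.mem_map.mpr ⟨i, hi, by rw [← hv]; exact (hp i).symm⟩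
    · rintro hm
      obtain ⟨i, hi, hv⟩ := List.mem_map.mp hm
      exact List.mem_map.mpr ⟨i, hi, by rw [← hv]; exact hp i⟩
  have hGkeys : ∀ v ∈ s.map (pst rep), v ∈ rep1.keys := by
    intro v hv
    obtain ⟨i, hi, hvi⟩ := List.mem_map.mp hv
    rw [← hvi, ← hp i]
    exact pst_mem rep1 hcl1 i (hmem_s i hi)
  refine ⟨?_, ?_, ?_, ?_⟩
  · intro x
    rw [hres, pst, PySem.Dict.getD, hget x]
    by_cases hc : x ∈ rep1.keys ∧ group.contains (rep1.getD x x)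
    · rw [if_pos hc]
      have hmemG : pst rep x ∈ s.map (pst rep) := by
        rw [← hGmem, ← hp x]
        exact hc.2
      rw [relab, if_pos hmemG]
      simp [htgt']
    · rw [if_neg hc]
      have hpx : rep1.getD x x = pst rep x := hp x
      by_cases hxk : x ∈ rep1.keys
      · have hnc : ¬ group.contains (rep1.getD x x) = true := fun h => hc ⟨hxk, h⟩
        have : pst rep x ∉ s.map (pst rep) := by
          rw [← hGmem, ← hpx]; exact hnc
        rw [relab, if_neg this, ← hpx, PySem.Dict.getD]
      · have hx1 : pst rep1 x = x := pst_of_not_mem rep1 x hxk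
        have hxx : pst rep x = x := (hp x).symm.trans hx1
        have : pst rep x ∉ s.map (pst rep) := by
          rw [hxx]; exact fun h => hxk (hGkeys x h)
        rw [relab, if_neg this, ← hp x, pst, PySem.Dict.getD]
  · rw [hres, hkeys, hk1]
  · rw [hres, hkeys]; exact hnd1
  · intro k v hkv
    rw [hres, hget k] at hkv
    rw [hres, hkeys]
    by_cases hc : k ∈ rep1.keys ∧ group.contains (rep1.getD k k)
    · rw [if_pos hc] at hkv
      cases hkv
      rw [htgt, pst] at *
      exact pst_mem rep1 hcl1 first (hmem_s first List.mem_cons_self)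
    · rw [if_neg hc] at hkv
      exact hcl1 k v hkv

-- ===== A's init phase =====

def SelfD (p : PySem.Dict String String) : Prop := ∀ k v, p.get? k = some v → v = k

theorem aInitItem_eq : aInitItem = bInsertNew := rfl

theorem bInsertNew_self (rep : PySem.Dict String String) (i : String) (h : SelfD rep) :
    SelfD (bInsertNew rep i) := by
  unfold bInsertNew
  by_cases hc : rep.contains i
  · rw [if_pos hc]; exact h
  · rw [if_neg hc]
    intro k v hkv
    rw [PySem.Dict.get?_insert] at hkv
    by_cases hk : k = i
    · rw [if_pos hk] at hkv; cases hkv; exact hk.symm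
    · rw [if_neg hk] at hkv; exact h k v hkv

theorem bInsertNew_nodup (rep : PySem.Dict String String) (i : String) (h : rep.keys.Nodup) :
    (bInsertNew rep i).keys.Nodup := by
  unfold bInsertNew
  by_cases hc : rep.contains i
  · rw [if_pos hc]; exact h
  · rw [if_neg hc]; exact PySem.Dict.nodup_keys_insert rep i i h

theorem bInitSelf_fold (s : List String) :
    ∀ (p : PySem.Dict String String), p.keys.Nodup → SelfD p →
    (s.foldl bInsertNew p).keys = PySem.Set.update p.keys s ∧
    (s.foldl bInsertNew p).keys.Nodup ∧ SelfD (s.foldl bInsertNew p) := by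
  induction s with
  | nil => intro p hnd hself; exact ⟨rfl, hnd, hself⟩
  | cons i s ih =>
    intro p hnd hself
    simp only [List.foldl_cons]
    obtain ⟨hk, hnd2, hself2⟩ := ih (bInsertNew p i) (bInsertNew_nodup p i hnd)
      (bInsertNew_self p i hself)
    exact ⟨by rw [hk, bInsertNew_keys, PySem.Set.update_cons], hnd2, hself2⟩

theorem aInit_spec : ∀ (sets : List (List String)) (p : PySem.Dict String String),
    p.keys.Nodup → SelfD p →
    (sets.foldl aInitSet p).keys =
      sets.foldl (fun ks s => PySem.Set.update ks s) p.keys ∧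
    (sets.foldl aInitSet p).keys.Nodup ∧ SelfD (sets.foldl aInitSet p) := by
  intro sets
  induction sets with
  | nil => intro p hnd hself; exact ⟨rfl, hnd, hself⟩
  | cons s sets ih =>
    intro p hnd hself
    simp only [List.foldl_cons]
    have hone : aInitSet p s = s.foldl bInsertNew p := by
      unfold aInitSet; rw [aInitItem_eq]
    obtain ⟨hk1, hnd1, hself1⟩ := bInitSelf_fold s p hnd hself
    rw [hone]
    obtain ⟨hk, hnd2, hself2⟩ := ih (s.foldl bInsertNew p) hnd1 hself1
    exact ⟨by rw [hk, hk1], hnd2, hself2⟩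

theorem pst_self (p : PySem.Dict String String) (h : SelfD p) (x : String) : pst p x = x := by
  cases hg : p.get? x with
  | none => rw [pst, PySem.Dict.getD, hg]; rfl
  | some v => rw [pst, getD_eq_of_get? p x v x hg]; exact h x v hg

theorem good_of_self (p : PySem.Dict String String) (hnd : p.keys.Nodup) (h : SelfD p) :
    Good p := by
  refine ⟨hnd, ?_, ?_⟩
  · intro k v hkv
    rw [h k v hkv]
    exact mem_of_get?_some p k v hkv
  · intro x
    exact ⟨x, RR.root (pst_self p h x)⟩

theorem mem_updateFold : ∀ (sets : List (List String)) (acc : List String) (i : String),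
    (i ∈ acc ∨ ∃ s ∈ sets, i ∈ s) →
    i ∈ sets.foldl (fun ks s => PySem.Set.update ks s) acc := by
  intro sets
  induction sets with
  | nil =>
    intro acc i h
    rcases h with h | ⟨s, hs, _⟩
    · exact h
    · cases hs
  | cons s sets ih =>
    intro acc i h
    simp only [List.foldl_cons]
    apply ih
    rcases h with h | ⟨s', hs', hi⟩
    · exact Or.inl ((PySem.Set.mem_update _ _ _).mpr (Or.inl h))
    · rcases List.mem_cons.mp hs' with h1 | h1
      · subst h1; exact Or.inl ((PySem.Set.mem_update _ _ _).mpr (Or.inr hi))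
      · exact Or.inr ⟨s', h1, hi⟩

-- ===== per-set simulation =====

theorem main_sim : ∀ (sets : List (List String)) (p rep : PySem.Dict String String),
    (∀ s ∈ sets, s ≠ []) → Good p → rep.keys.Nodup → Cl rep →
    (∀ x, RR p x (pst rep x)) →
    (∀ s ∈ sets, ∀ i ∈ s, i ∈ p.keys) →
    Good (sets.foldl aUnionSet p) ∧
    (sets.foldl aUnionSet p).keys = p.keys ∧
    (∀ x, RR (sets.foldl aUnionSet p) x (pst (sets.foldl bMergeSet rep) x)) ∧
    (sets.foldl bMergeSet rep).keys =
      sets.foldl (fun ks s => PySem.Set.update ks s) rep.keys ∧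
    (sets.foldl bMergeSet rep).keys.Nodup ∧ Cl (sets.foldl bMergeSet rep) := by
  intro sets
  induction sets with
  | nil => intro p rep _ hg hnd hcl hρ _; exact ⟨hg, rfl, hρ, rfl, hnd, hcl⟩
  | cons s sets ih =>
    intro p rep hne hg hnd hcl hρ hsk
    obtain ⟨first, rest, rfl⟩ : ∃ a l, s = a :: l := by
      cases s with
      | nil => exact absurd rfl (hne [] List.mem_cons_self)
      | cons a l => exact ⟨a, l, rfl⟩
    simp only [List.foldl_cons]
    have hA1 : aUnionSet p (first :: rest) =
        rest.foldl (fun p item => ufUnion (p.size + 1) p first item) p := rfl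
    have hfk : first ∈ p.keys :=
      hsk (first :: rest) List.mem_cons_self first List.mem_cons_self
    have hjk : ∀ j ∈ rest, j ∈ p.keys :=
      fun j hj => hsk (first :: rest) List.mem_cons_self j (List.mem_cons_of_mem _ hj)
    have hρ0 : ∀ x, RR p x (relab [pst rep first] (pst rep first) (pst rep x)) := by
      intro x; rw [relab_singleton]; exact hρ x
    obtain ⟨hg2, hk2, hρ2⟩ := unionFold_spec (pst rep) first (pst rep first) rest p
      [pst rep first] hg List.mem_cons_self List.mem_cons_self hfk hjk hρ0
    rw [← hA1] at hg2 hk2 hρ2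
    obtain ⟨hbp, hbk, hbnd, hbcl⟩ := bMergeSet_spec rep first rest hnd hcl
    have hρ3 : ∀ x, RR (aUnionSet p (first :: rest)) x
        (pst (bMergeSet rep (first :: rest)) x) := by
      intro x
      rw [hbp x]
      have := hρ2 x
      rwa [show [pst rep first] ++ rest.map (pst rep) = (first :: rest).map (pst rep) by
        simp] at this
    have hsk2 : ∀ s' ∈ sets, ∀ i ∈ s', i ∈ (aUnionSet p (first :: rest)).keys := by
      intro s' hs' i hi
      rw [hk2]
      exact hsk s' (List.mem_cons_of_mem _ hs') i hi
    obtain ⟨hg4, hk4, hρ4, hbk4, hbnd4, hbcl4⟩ := ih (aUnionSet p (first :: rest))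
      (bMergeSet rep (first :: rest)) (fun s' hs' => hne s' (List.mem_cons_of_mem _ hs'))
      hg2 hbnd hbcl hρ3 hsk2
    refine ⟨hg4, hk4.trans hk2, hρ4, ?_, hbnd4, hbcl4⟩
    rw [hbk4, hbk]

-- ===== the final roots pass =====

theorem rootsFold_spec (rep : PySem.Dict String String) :
    ∀ (ks : List String) (q : PySem.Dict String String) (acc : PySem.Set String),
    Good q → (∀ x, RR q x (pst rep x)) →
    (ks.foldl aRootStep (q, acc)).2 = PySem.Set.update acc (ks.map (pst rep)) := by
  intro ks
  induction ks with
  | nil => intro q acc _ _; rfl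
  | cons item ks ih =>
    intro q acc hg hρ
    simp only [List.foldl_cons]
    obtain ⟨hf2, hgf, heqf⟩ := ufFind_run q item (pst rep item) hg (hρ item)
    have hstep : aRootStep (q, acc) item =
        ((ufFind (q.size + 1) q item).1,
          PySem.Set.add acc (ufFind (q.size + 1) q item).2) := rfl
    rw [hstep, hf2]
    have hρ' : ∀ x, RR (ufFind (q.size + 1) q item).1 x (pst rep x) :=
      fun x => (heqf.2 x (pst rep x)).mp (hρ x)
    rw [ih (ufFind (q.size + 1) q item).1 (PySem.Set.add acc (pst rep item)) hgf hρ']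
    rw [List.map_cons, PySem.Set.update_cons]

-- ===== VERDICT (by name: the statement is the Claim_ definition above) =====
theorem are_sets_connected_spec : Claim_equal_are_sets_connected := by
  unfold Claim_equal_are_sets_connected
  intro sets _ hpre
  unfold Spec_are_sets_connected
  have hA : are_sets_connected sets =
      (((sets.foldl aUnionSet (sets.foldl aInitSet PySem.Dict.empty)).keys.foldl aRootStep
        (sets.foldl aUnionSet (sets.foldl aInitSet PySem.Dict.empty), PySem.Set.empty)).2.length
        == 1) := rfl
  have hB : are_sets_connected_alt sets =
      ((PySem.Set.ofList (sets.foldl bMergeSet PySem.Dict.empty).values).length == 1) := rfl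
  rw [hA, hB]
  have hself0 : SelfD (PySem.Dict.empty : PySem.Dict String String) := by
    intro k v hkv
    rw [PySem.Dict.get?_empty] at hkv
    simp at hkv
  have hnd0 : (PySem.Dict.empty : PySem.Dict String String).keys.Nodup := by
    rw [PySem.Dict.keys_empty]; exact List.nodup_nil
  obtain ⟨hk0, hnd1, hself1⟩ := aInit_spec sets PySem.Dict.empty hnd0 hself0
  set p0 := sets.foldl aInitSet PySem.Dict.empty with hp0
  have hg0 : Good p0 := good_of_self p0 hnd1 hself1
  have hρ0 : ∀ x, RR p0 x (pst (PySem.Dict.empty : PySem.Dict String String) x) := by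
    intro x
    have he : pst (PySem.Dict.empty : PySem.Dict String String) x = x := by
      rw [pst, PySem.Dict.getD, PySem.Dict.get?_empty]; rfl
    rw [he]
    exact RR.root (pst_self p0 hself1 x)
  have hcl0 : Cl (PySem.Dict.empty : PySem.Dict String String) := by
    intro k v hkv
    rw [PySem.Dict.get?_empty] at hkv
    simp at hkv
  have hsk0 : ∀ s ∈ sets, ∀ i ∈ s, i ∈ p0.keys := by
    intro s hs i hi
    rw [hk0, PySem.Dict.keys_empty]
    exact mem_updateFold sets [] i (Or.inr ⟨s, hs, hi⟩)
  obtain ⟨hg1, hk1, hρ1, hbk1, hbnd1, hbcl1⟩ :=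
    main_sim sets p0 PySem.Dict.empty hpre hg0 hnd0 hcl0 hρ0 hsk0
  set p1 := sets.foldl aUnionSet p0 with hp1
  set repF := sets.foldl bMergeSet (PySem.Dict.empty : PySem.Dict String String) with hrepF
  have hroots := rootsFold_spec repF p1.keys p1 PySem.Set.empty hg1 hρ1
  rw [hroots]
  have hupdempty : PySem.Set.update (PySem.Set.empty : PySem.Set String)
      (p1.keys.map (pst repF)) = PySem.Set.ofList (p1.keys.map (pst repF)) :=
    PySem.Set.update_nil_left _
  rw [hupdempty]
  have hvals : repF.values = repF.keys.map (pst repF) := by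
    rw [PySem.Dict.values_eq_map_keys repF hbnd1 ""]
    apply List.map_congr_left
    intro k hk
    obtain ⟨v, hv⟩ : ∃ v, repF.get? k = some v := by
      cases hgk : repF.get? k with
      | none =>
        rw [PySem.Dict.get?_eq_none_iff_contains,
          (PySem.Dict.contains_iff_mem_keys repF k).mpr hk] at hgk
        exact absurd hgk (by simp)
      | some v => exact ⟨v, rfl⟩
    rw [getD_eq_of_get? repF k v "" hv, pst, getD_eq_of_get? repF k v k hv]
  have hkeq : p1.keys = repF.keys := by
    rw [hk1, hk0, hbk1, PySem.Dict.keys_empty]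
  rw [hvals, hkeq]
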